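-- pv_equiv track=rewrite | github.com/Josh-moreton/alchemiser-quant | scripts/indicator_live_bar_analysis.py | generate_indicator_configs
-- ===== SOURCE A (Python) =====
-- import itertools
--
-- TOGGLEABLE_INDICATORS = [
--     "rsi",
--     "moving_average",
--     "moving_average_return",
--     "cumulative_return",
--     "stdev_return",
--     "stdev_price",
--     "max_drawdown",
--     "exponential_moving_average_price",
-- ]
--
-- def generate_indicator_configs(indicators: set[str]) -> list[dict[str, bool]]:
--     """Generate all T0/T-1 combinations for a set of indicators.
--
--     Args:
--         indicators: Set of indicator types to toggle
--
--     Returns: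
--         List of all possible configurations
--     """
--     # Filter to only toggleable indicators
--     toggleable = [i for i in indicators if i in TOGGLEABLE_INDICATORS]
--
--     if not toggleable:
--         # No toggleable indicators, return single default config
--         return [{}]
--
--     # Generate all combinations
--     configs: list[dict[str, bool]] = []
--     for values in itertools.product([True, False], repeat=len(toggleable)):
--         config = dict(zip(toggleable, values))
--         configs.append(config)
--
--     return configs
-- ===== SOURCE B (Python) =====
-- TOGGLEABLE_INDICATORS = [
--     "rsi",
--     "moving_average",
--     "moving_average_return",
--     "cumulative_return",
--     "stdev_return",
--     "stdev_price",
--     "max_drawdown",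
--     "exponential_moving_average_price",
-- ]
--
-- def generate_indicator_configs(indicators: set[str]) -> list[dict[str, bool]]:
--     """Generate all T0/T-1 combinations for a set of indicators."""
--     toggleable = [i for i in indicators if i in TOGGLEABLE_INDICATORS]
--     configs: list[dict[str, bool]] = [{}]
--     for indicator in toggleable:
--         configs = [{**cfg, indicator: value} for cfg in configs for value in (True, False)]
--     return configs
-- ===== Notes on version B (the rewrite author's own statement) =====
-- stated objective: simpler
-- what changed: Replaces itertools.product plus dict(zip(...)) and the empty-case guard with incremental expansion: start from [{}] and for each toggleable indicator double the config list by extending every config with indicator:True then indicator:False.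
import Mathlib
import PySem

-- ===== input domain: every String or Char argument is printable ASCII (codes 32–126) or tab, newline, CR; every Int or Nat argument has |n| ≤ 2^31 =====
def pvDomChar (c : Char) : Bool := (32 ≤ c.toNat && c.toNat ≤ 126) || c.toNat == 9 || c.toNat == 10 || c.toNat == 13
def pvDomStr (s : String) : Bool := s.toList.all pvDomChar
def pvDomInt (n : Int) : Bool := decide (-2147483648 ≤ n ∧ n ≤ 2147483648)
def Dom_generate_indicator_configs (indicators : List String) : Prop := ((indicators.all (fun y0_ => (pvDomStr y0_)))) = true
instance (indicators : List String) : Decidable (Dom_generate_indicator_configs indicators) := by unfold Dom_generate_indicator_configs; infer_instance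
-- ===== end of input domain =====

-- B replaces itertools.product + dict(zip) + the empty-case guard by incremental doubling of the
-- config list (objective: simpler). Equivalence is proved on distinct-element lists (the Python
-- parameter is a set).

-- ===== PORT A =====
def pvToggleable : List String :=
  ["rsi", "moving_average", "moving_average_return", "cumulative_return",
   "stdev_return", "stdev_price", "max_drawdown", "exponential_moving_average_price"]

-- itertools.product([True, False], repeat=n), in product's order (leftmost position varies slowest)
def pvProduct2 : Nat → List (List Bool)
  | 0 => [[]]
  | n + 1 => [true, false].flatMap (fun b => (pvProduct2 n).map (fun t => b :: t))

def generate_indicator_configs (indicators : List String) : List (List (String × Bool)) :=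
  let toggleable := indicators.filter (fun i => pvToggleable.contains i)
  if toggleable = [] then [[]]
  else
    (pvProduct2 toggleable.length).foldl
      (fun configs values =>
        configs ++ [((toggleable.zip values).foldl
                       (fun d p => d.insert p.1 p.2) PySem.Dict.empty).items])
      []

-- ===== PORT B =====
def generate_indicator_configs_alt (indicators : List String) : List (List (String × Bool)) :=
  let toggleable := indicators.filter (fun i => pvToggleable.contains i)
  toggleable.foldl
    (fun configs indicator =>
      configs.flatMap (fun cfg => [cfg ++ [(indicator, true)], cfg ++ [(indicator, false)]]))
    [[]]

-- ===== PRECONDITION & SPEC =====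
-- The Python parameter is a set[str]; Pre_ states exactly that set-hood (distinct elements).
def Pre_generate_indicator_configs (indicators : List String) : Prop := indicators.Nodup
instance (indicators : List String) : Decidable (Pre_generate_indicator_configs indicators) := by unfold Pre_generate_indicator_configs; infer_instance
def pvWitness_generate_indicator_configs : List String := ["rsi", "max_drawdown", "foo"]

def Spec_generate_indicator_configs (indicators : List String) (out : List (List (String × Bool))) : Prop := out = generate_indicator_configs_alt indicators
instance (indicators : List String) (out : List (List (String × Bool))) : Decidable (Spec_generate_indicator_configs indicators out) := by unfold Spec_generate_indicator_configs; infer_instance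

-- ===== CLAIM (what is proved, stated in full; the proofs are below) =====
def Claim_equal_generate_indicator_configs : Prop := ∀ (indicators : List String), Dom_generate_indicator_configs indicators → Pre_generate_indicator_configs indicators → Spec_generate_indicator_configs indicators (generate_indicator_configs indicators)

-- ===== LEMMAS AND PROOFS =====

theorem pvProduct2_length {n : Nat} {vs : List Bool} (h : vs ∈ pvProduct2 n) :
    vs.length = n := by
  induction n generalizing vs with
  | zero => simp [pvProduct2] at h; simp [h]
  | succ n ih =>
    simp only [pvProduct2, List.mem_flatMap, List.mem_map, List.mem_cons, List.not_mem_nil] at h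
    obtain ⟨b, _, t, ht, rfl⟩ := h
    simp [ih ht]

-- dict(zip(t, vs)) on distinct keys t is just the zipped association list
theorem pvDictZip (t : List String) (vs : List Bool) (ht : t.Nodup) (hl : vs.length = t.length) :
    ((t.zip vs).foldl (fun d p => d.insert p.1 p.2) PySem.Dict.empty).items = t.zip vs := by
  have hfst : (t.zip vs).map Prod.fst = t := List.map_fst_zip (by omega : t.length ≤ vs.length)
  have := PySem.Dict.items_foldl_insert_fresh (l := t.zip vs) (k := Prod.fst) (v := Prod.snd)
      (d := PySem.Dict.empty) (by intro a _; simp) (by rw [hfst]; exact ht)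
  simpa using this

-- B's doubling loop computes every product combination zipped with t, appended behind each config
theorem pvExpand (t : List String) (configs : List (List (String × Bool))) :
    t.foldl
      (fun cs i => cs.flatMap (fun cfg => [cfg ++ [(i, true)], cfg ++ [(i, false)]]))
      configs
    = configs.flatMap (fun c => (pvProduct2 t.length).map (fun vs => c ++ t.zip vs)) := by
  induction t generalizing configs with
  | nil => simp [pvProduct2]
  | cons i t ih =>
    simp only [List.foldl_cons, ih, pvProduct2, List.length_cons]
    rw [List.flatMap_assoc]
    apply List.flatMap_congr
    intro c _
    simp [Function.comp_def]

theorem generate_indicator_configs_spec : Claim_equal_generate_indicator_configs := by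
  intro indicators _ hpre
  unfold Spec_generate_indicator_configs generate_indicator_configs generate_indicator_configs_alt
  dsimp only
  have htnd : (indicators.filter (fun i => pvToggleable.contains i)).Nodup := hpre.filter _
  set t := indicators.filter (fun i => pvToggleable.contains i) with hts
  have hB := pvExpand t [[]]
  simp only [List.flatMap_cons, List.flatMap_nil, List.append_nil, List.nil_append] at hB
  rw [hB]
  by_cases h : t = []
  · simp [h, pvProduct2]
  · rw [if_neg h, PySem.List.foldl_append_singleton_eq_map]
    apply List.map_congr_left
    intro vs hvs
    exact pvDictZip t vs htnd (pvProduct2_length hvs)
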